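-- pv_equiv track=rewrite | github.com/M0VENTURA/sptnr | popularity.py | clean_conflicting_genres
-- ===== SOURCE A (Python) =====
-- def clean_conflicting_genres(genres):
--     """
--     Remove conflicting or irrelevant genres based on dominant tags.
--     Example: If 'punk' exists, drop 'electronic'.
--     """
--     genres_lower = [g.lower() for g in genres]
--
--     # If punk dominates, remove electronic/electro
--     if any("punk" in g for g in genres_lower):
--         genres_lower = [g for g in genres_lower if g not in ["electronic", "electro"]]
--
--     # If metal dominates, remove electronic
--     if any("metal" in g for g in genres_lower):
--         genres_lower = [g for g in genres_lower if g not in ["electronic", "electro"]]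
--
--     # Remove generic tags if specific ones exist
--     if any("progressive metal" in g for g in genres_lower):
--         genres_lower = [g for g in genres_lower if g not in ["metal", "heavy metal"]]
--
--     return genres_lower
-- ===== SOURCE B (Python) =====
-- # Data-driven rule engine: a rule table is scanned once to accumulate a set of
-- # banned tags, then one removal pass filters the lowercased list.
-- _CONFLICT_RULES = [
--     ("punk", ("electronic", "electro")),
--     ("metal", ("electronic", "electro")),
--     ("progressive metal", ("metal", "heavy metal")),
-- ]
--
--
-- def clean_conflicting_genres(genres):
--     """
--     Remove conflicting or irrelevant genres based on dominant tags.
--     Example: If 'punk' exists, drop 'electronic'.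
--     """
--     lows = [g.lower() for g in genres]
--     banned = set()
--     for trigger, targets in _CONFLICT_RULES:
--         if any(trigger in g for g in lows):
--             banned.update(targets)
--     return [g for g in lows if g not in banned]
-- ===== Notes on version B (the rewrite author's own statement) =====
-- stated objective: alternative
-- what changed: Replaces A's three hardcoded conditional list rebinds by a data-driven rule table (trigger substring -> banned tags) folded into a single banned set, followed by one removal pass over the lowercased list.
import Mathlib
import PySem

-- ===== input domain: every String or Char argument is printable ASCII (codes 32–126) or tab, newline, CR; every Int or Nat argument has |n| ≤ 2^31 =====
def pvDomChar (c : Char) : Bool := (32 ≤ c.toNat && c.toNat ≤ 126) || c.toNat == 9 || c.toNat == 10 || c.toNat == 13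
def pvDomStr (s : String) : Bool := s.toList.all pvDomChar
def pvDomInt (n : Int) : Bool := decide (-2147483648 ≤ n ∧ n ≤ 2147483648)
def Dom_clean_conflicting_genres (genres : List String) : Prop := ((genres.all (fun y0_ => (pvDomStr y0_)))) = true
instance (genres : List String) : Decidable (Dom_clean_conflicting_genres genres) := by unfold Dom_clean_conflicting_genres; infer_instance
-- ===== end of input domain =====

-- B replaces A's three hardcoded conditional list rebinds by a data-driven rule table
-- folded into a banned set, then one removal pass (objective: alternative decomposition).


-- ===== PORT A =====
def clean_conflicting_genres (genres : List String) : List String :=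
  let gl := genres.map PySem.Str.lower
  let gl := if gl.any (fun g => PySem.Str.isIn "punk" g)
    then gl.filter (fun g => !(["electronic", "electro"].contains g)) else gl
  let gl := if gl.any (fun g => PySem.Str.isIn "metal" g)
    then gl.filter (fun g => !(["electronic", "electro"].contains g)) else gl
  let gl := if gl.any (fun g => PySem.Str.isIn "progressive metal" g)
    then gl.filter (fun g => !(["metal", "heavy metal"].contains g)) else gl
  gl

-- ===== PORT B =====
-- rule table: trigger substring -> tags banned when that trigger occurs
def pvConflictRules : List (String × List String) :=
  [("punk", ["electronic", "electro"]),
   ("metal", ["electronic", "electro"]),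
   ("progressive metal", ["metal", "heavy metal"])]

def clean_conflicting_genres_alt (genres : List String) : List String :=
  let lows := genres.map PySem.Str.lower
  let banned := pvConflictRules.foldl
    (fun banned r =>
      if lows.any (fun g => PySem.Str.isIn r.1 g)
      then PySem.Set.update banned r.2 else banned)
    PySem.Set.empty
  lows.filter (fun g => !(PySem.Set.contains banned g))

-- ===== PRECONDITION & SPEC =====
def Spec_clean_conflicting_genres (genres : List String) (out : List String) : Prop := out = clean_conflicting_genres_alt genres
instance (genres : List String) (out : List String) : Decidable (Spec_clean_conflicting_genres genres out) := by unfold Spec_clean_conflicting_genres; infer_instance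

-- ===== CLAIM (what is proved, stated in full; the proofs are below) =====
def Claim_equal_clean_conflicting_genres : Prop := ∀ (genres : List String), Dom_clean_conflicting_genres genres → Spec_clean_conflicting_genres genres (clean_conflicting_genres genres)

-- ===== LEMMAS AND PROOFS =====

-- `any p` is unchanged by a filter that only drops elements on which p is false
theorem any_filter_of_imp {p q : String → Bool} (l : List String)
    (h : ∀ g, p g = true → q g = true) : (l.filter q).any p = l.any p := by
  induction l with
  | nil => rfl
  | cons a t ih =>
    by_cases hq : q a = true
    · simp [hq, ih]
    · have hp : p a = false := by
        cases hpa : p a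
        · rfl
        · exact absurd (h a hpa) hq
      simp [hq, hp, ih]

theorem metal_not_elec (g : String) :
    PySem.Str.isIn "metal" g = true → (!(["electronic", "electro"].contains g)) = true := by
  intro h
  by_contra hc
  simp only [Bool.not_eq_true'] at hc
  simp only [Bool.not_eq_false, List.contains_cons, List.contains_nil,
    Bool.or_false, Bool.or_eq_true, beq_iff_eq] at hc
  rcases hc with hc | hc <;> subst hc <;> simp_all <;> revert h <;> decide

theorem prog_not_elec (g : String) :
    PySem.Str.isIn "progressive metal" g = true → (!(["electronic", "electro"].contains g)) = true := by
  intro h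
  by_contra hc
  simp only [Bool.not_eq_true'] at hc
  simp only [Bool.not_eq_false, List.contains_cons, List.contains_nil,
    Bool.or_false, Bool.or_eq_true, beq_iff_eq] at hc
  rcases hc with hc | hc <;> subst hc <;> simp_all <;> revert h <;> decide

-- ===== VERDICT (by name: the statement is the Claim_ definition above) =====
theorem clean_conflicting_genres_spec : Claim_equal_clean_conflicting_genres := by
  intro genres _
  unfold Spec_clean_conflicting_genres
  simp only [clean_conflicting_genres, clean_conflicting_genres_alt, pvConflictRules,
    List.foldl]
  set L := genres.map PySem.Str.lower with hL
  cases hb1 : L.any (fun g => PySem.Str.isIn "punk" g) <;>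
  cases hb2 : L.any (fun g => PySem.Str.isIn "metal" g) <;>
  cases hb3 : L.any (fun g => PySem.Str.isIn "progressive metal" g) <;>
    simp only [any_filter_of_imp _ metal_not_elec, any_filter_of_imp _ prog_not_elec,
      hb1, hb2, hb3, Bool.false_eq_true, if_true, if_false] <;>
    (try simp only [List.filter_filter]) <;>
    first
      | (symm; rw [List.filter_eq_self]; intro g _;
         simp [PySem.Set.empty, PySem.Set.contains])
      | (apply List.filter_congr; intro g _;
         cases h1 : (["electronic", "electro"].contains g) <;>
         cases h2 : (["metal", "heavy metal"].contains g) <;>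
         simp_all [PySem.Set.update, PySem.Set.add, PySem.Set.empty, PySem.Set.contains,
           List.foldl])
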